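-- pv_equiv track=rewrite | github.com/housestudy/codingTest | jehyeok/석유시추.py | solution
-- ===== SOURCE A (Python) =====
-- from collections import deque
--
-- def solution(land):
--     answer = 0
--
--     n = len(land)
--     m = len(land[0])
--
--     dx = [0,0,1,-1]
--     dy = [1,-1,0,0]
--
--     result = [0 for i in range(m+1)]
--     visited = [[0 for i in range(m)] for j in range(n)]
--
--     def bfs(a, b):
--         count = 0
--         visited[a][b] = 1
--
--         q = deque()
--         q.append((a,b))
--
--         min_y, max_y = b, b
--
--         while q:
--             x,y = q.popleft()
--
--             min_y = min(min_y, y)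
--             max_y = max(max_y, y)
--
--             count += 1
--
--             for i in range(4):
--                 nx = x + dx[i]
--                 ny = y + dy[i]
--
--                 if nx < 0 or ny < 0 or nx >= n or ny >= m:
--                     continue
--
--                 if visited[nx][ny] == 0 and land[nx][ny] == 1:
--                     visited[nx][ny] = 1
--                     q.append((nx,ny))
--
--         for i in range(min_y, max_y+1):
--             result[i] += count
--
--     for i in range(n):
--         for j in range(m):
--             if visited[i][j] == 0 and land[i][j] == 1:
--                 bfs(i,j)
--
--     answer = max(result)
--
--     return answer
-- ===== SOURCE B (Python) =====
-- def solution(land):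
--     n = len(land)
--     m = len(land[0])
--     seen = set()
--     comps = []  # (size, min_col, max_col) per connected region of oil
--     for i in range(n):
--         for j in range(m):
--             if land[i][j] == 1 and (i, j) not in seen:
--                 seen.add((i, j))
--                 stack = [(i, j)]
--                 size = 0
--                 lo = hi = j
--                 while stack:
--                     x, y = stack.pop()
--                     size += 1
--                     lo = min(lo, y)
--                     hi = max(hi, y)
--                     for nx, ny in ((x + 1, y), (x - 1, y), (x, y + 1), (x, y - 1)):
--                         if 0 <= nx < n and 0 <= ny < m and land[nx][ny] == 1 and (nx, ny) not in seen:
--                             seen.add((nx, ny))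
--                             stack.append((nx, ny))
--                 comps.append((size, lo, hi))
--     return max((sum(s for s, lo, hi in comps if lo <= c <= hi) for c in range(m)), default=0)
-- ===== Notes on version B (the rewrite author's own statement) =====
-- stated objective: alternative
-- what changed: Flood fill by an explicit LIFO stack with a hash set of seen cells (instead of a BFS deque plus an n-by-m visited matrix), collecting one (size, min_col, max_col) triple per region, and the answer computed by inverting the aggregation loop: per column sum the sizes of regions whose span covers it (instead of per region adding its size into every covered slot of a result array).
import Mathlib
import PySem

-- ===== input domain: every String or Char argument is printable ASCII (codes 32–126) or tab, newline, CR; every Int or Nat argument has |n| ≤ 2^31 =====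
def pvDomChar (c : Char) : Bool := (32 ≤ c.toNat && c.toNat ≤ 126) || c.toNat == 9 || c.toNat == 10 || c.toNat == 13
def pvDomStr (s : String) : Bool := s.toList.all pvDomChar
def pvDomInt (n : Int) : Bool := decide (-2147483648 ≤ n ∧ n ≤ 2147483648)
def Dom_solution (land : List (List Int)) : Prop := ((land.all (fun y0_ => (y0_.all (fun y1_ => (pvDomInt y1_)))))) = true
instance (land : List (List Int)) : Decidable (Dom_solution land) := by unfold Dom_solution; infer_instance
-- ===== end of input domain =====

-- B replaces A's BFS deque + n×m visited matrix by a LIFO stack + a set of seen cells collecting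
-- one (size, min_col, max_col) triple per region, and inverts the aggregation loop (per column sum
-- the covering regions, instead of per region adding into a result array); objective: alternative.

-- ===== PORT A =====
def pvN (land : List (List Int)) : Int := (land.length : Int)
def pvM (land : List (List Int)) : Int := ((PySem.List.pyGetD land 0 []).length : Int)

-- land[x][y] / visited[x][y]; every use in either port is guarded 0 ≤ x < n, 0 ≤ y < m,
-- so under Pre_solution the defaults are never read (exact there)
def pvLandGet (land : List (List Int)) (x y : Int) : Int :=
  PySem.List.pyGetD (PySem.List.pyGetD land x []) y 0

def pvDxA : List Int := [0, 0, 1, -1]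
def pvDyA : List Int := [1, -1, 0, 0]

-- visited[a][b] = 1 ; the indices are guaranteed 0 ≤ a < n, 0 ≤ b < m by A's guards, so .toNat is exact
def pvVisSet (vis : List (List Int)) (x y : Int) : List (List Int) :=
  vis.set x.toNat ((vis.getD x.toNat []).set y.toNat 1)

-- the 'for i in range(4)' neighbour loop of bfs
def pvBfsScan (land : List (List Int)) (x y : Int)
    (st : List (List Int) × List (Int × Int)) : List (List Int) × List (Int × Int) :=
  (PySem.List.pyRange 0 4 1).foldl
    (fun st i =>
      let nx := x + PySem.List.pyGetD pvDxA i 0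
      let ny := y + PySem.List.pyGetD pvDyA i 0
      if nx < 0 ∨ ny < 0 ∨ pvN land ≤ nx ∨ pvM land ≤ ny then st
      else if pvLandGet st.1 nx ny = 0 ∧ pvLandGet land nx ny = 1 then
        (pvVisSet st.1 nx ny, st.2 ++ [(nx, ny)])
      else st)
    st

-- the 'while q:' loop of bfs; the fuel only makes the recursion structural (proved sufficient below)
def pvBfsLoop (land : List (List Int)) :
    Nat → List (List Int) × List (Int × Int) × Int × Int × Int →
    List (List Int) × List (Int × Int) × Int × Int × Int
  | 0, st => st
  | fuel + 1, (vis, q, count, mn, mx) =>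
    match q with
    | [] => (vis, [], count, mn, mx)
    | (x, y) :: rest =>
      let mn' := min mn y
      let mx' := max mx y
      let st' := pvBfsScan land x y (vis, rest)
      pvBfsLoop land fuel (st'.1, st'.2, count + 1, mn', mx')

-- bfs(a, b): returns the updated visited matrix and result array
def pvBfsA (land : List (List Int)) (a b : Int) (vis : List (List Int)) (result : List Int) :
    List (List Int) × List Int :=
  let st := pvBfsLoop land (2 * (pvN land).toNat * (pvM land).toNat + 2)
      (pvVisSet vis a b, [(a, b)], 0, b, b)
  -- for i in range(min_y, max_y+1): result[i] += count  (indices in [0, m) here, so .toNat is exact)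
  (st.1, (PySem.List.pyRange st.2.2.2.1 (st.2.2.2.2 + 1) 1).foldl
      (fun res i => res.set i.toNat (res.getD i.toNat 0 + st.2.2.1)) result)

def solution (land : List (List Int)) : Int :=
  let n := pvN land
  let m := pvM land
  let result : List Int := (PySem.List.pyRange 0 (m + 1) 1).map (fun _ => (0 : Int))
  let visited : List (List Int) :=
    (PySem.List.pyRange 0 n 1).map (fun _ => (PySem.List.pyRange 0 m 1).map (fun _ => (0 : Int)))
  let st := (PySem.List.pyRange 0 n 1).foldl
      (fun st i => (PySem.List.pyRange 0 m 1).foldl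
        (fun (st : List (List Int) × List Int) j =>
          if pvLandGet st.1 i j = 0 ∧ pvLandGet land i j = 1 then pvBfsA land i j st.1 st.2 else st)
        st)
      (visited, result)
  -- answer = max(result); result is nonempty (length m+1), so the default is never read
  (PySem.List.max? st.2 (fun y => y)).getD 0

-- ===== PORT B =====
-- one neighbour test of the stack DFS: bounds, oil, not seen → mark seen and push
def pvDfsStep (land : List (List Int))
    (st : List (Int × Int) × List (Int × Int)) (c : Int × Int) :
    List (Int × Int) × List (Int × Int) :=
  if 0 ≤ c.1 ∧ c.1 < pvN land ∧ 0 ≤ c.2 ∧ c.2 < pvM land ∧ pvLandGet land c.1 c.2 = 1 ∧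
      PySem.Set.contains st.1 c = false then
    (PySem.Set.add st.1 c, st.2 ++ [c])
  else st

-- the 'while stack:' loop; stack.pop() takes the LAST element; fuel proved sufficient below
def pvDfsLoop (land : List (List Int)) :
    Nat → List (Int × Int) × List (Int × Int) × Int × Int × Int →
    List (Int × Int) × Int × Int × Int
  | 0, (seen, _, size, lo, hi) => (seen, size, lo, hi)
  | fuel + 1, (seen, stack, size, lo, hi) =>
    match stack.getLast? with
    | none => (seen, size, lo, hi)
    | some (x, y) =>
      let st' := [(x + 1, y), (x - 1, y), (x, y + 1), (x, y - 1)].foldl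
          (pvDfsStep land) (seen, stack.dropLast)
      pvDfsLoop land fuel (st'.1, st'.2, size + 1, min lo y, max hi y)

-- sum(s for s, lo, hi in comps if lo <= c <= hi)
def pvSumC (comps : List (Int × Int × Int)) (c : Int) : Int :=
  ((comps.filter (fun t => decide (t.2.1 ≤ c ∧ c ≤ t.2.2))).map (fun t => t.1)).sum

def solution_alt (land : List (List Int)) : Int :=
  let n := pvN land
  let m := pvM land
  let st := (PySem.List.pyRange 0 n 1).foldl
      (fun st i => (PySem.List.pyRange 0 m 1).foldl
        (fun (st : List (Int × Int) × List (Int × Int × Int)) j =>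
          if pvLandGet land i j = 1 ∧ PySem.Set.contains st.1 (i, j) = false then
            let r := pvDfsLoop land (2 * n.toNat * m.toNat + 2)
                (PySem.Set.add st.1 (i, j), [(i, j)], 0, j, j)
            (r.1, st.2 ++ [(r.2.1, r.2.2.1, r.2.2.2)])
          else st)
        st)
      (([] : List (Int × Int)), ([] : List (Int × Int × Int)))
  -- max(（…for c in range(m)), default=0)
  (PySem.List.max? ((PySem.List.pyRange 0 m 1).map (pvSumC st.2)) (fun y => y)).getD 0

-- ===== PRECONDITION & SPEC =====
-- Pre_ excludes exactly the inputs where the Python A raises an IndexError: the empty grid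
-- (land[0]) and grids with a row shorter than the first row (land[x][y] during the scan).
-- (Both ports read cells through the same total accessor, so the equality proof below happens
-- to hold without using Pre_; Pre_ is still stated because Python A raises outside it.)
def Pre_solution (land : List (List Int)) : Prop :=
  land ≠ [] ∧ ∀ row ∈ land, (land.headD []).length ≤ row.length

instance (land : List (List Int)) : Decidable (Pre_solution land) := by
  unfold Pre_solution; infer_instance

def pvWitness_solution : List (List Int) := [[1, 0, 1], [1, 1, 0]]

def Spec_solution (land : List (List Int)) (out : Int) : Prop := out = solution_alt land
instance (land : List (List Int)) (out : Int) : Decidable (Spec_solution land out) := by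
  unfold Spec_solution; infer_instance

-- ===== CLAIM (what is proved, stated in full; the proofs are below) =====
def Claim_equal_solution : Prop :=
  ∀ (land : List (List Int)), Dom_solution land → Pre_solution land → Spec_solution land (solution land)

-- ===== LEMMAS AND PROOFS =====
-- ===== abstract component machinery (proof-only) =====
def pvInB (land : List (List Int)) (c : Int × Int) : Prop :=
  0 ≤ c.1 ∧ c.1 < pvN land ∧ 0 ≤ c.2 ∧ c.2 < pvM land

def pvOne (land : List (List Int)) (c : Int × Int) : Prop :=
  pvInB land c ∧ pvLandGet land c.1 c.2 = 1

def pvAdj (a b : Int × Int) : Prop :=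
  b = (a.1, a.2 + 1) ∨ b = (a.1, a.2 - 1) ∨ b = (a.1 + 1, a.2) ∨ b = (a.1 - 1, a.2)

def pvReach (land : List (List Int)) (V : Finset (Int × Int)) (s c : Int × Int) : Prop :=
  Relation.ReflTransGen (fun a b => pvAdj a b ∧ pvOne land b ∧ b ∉ V) s c

-- what both exploration loops compute: the characterisation pins P uniquely
def pvExSpec (land : List (List Int)) (V : Finset (Int × Int)) (s : Int × Int)
    (P : Finset (Int × Int)) : Prop :=
  s ∈ P ∧ (∀ c ∈ P, pvReach land V s c) ∧
  (∀ a ∈ P, ∀ b, pvAdj a b → pvOne land b → b ∉ V → b ∈ P)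

theorem pvExSpec_mem_iff {land V s P} (h : pvExSpec land V s P) :
    ∀ c, c ∈ P ↔ pvReach land V s c := by
  obtain ⟨hs, hr, hcl⟩ := h
  intro c
  constructor
  · exact hr c
  · intro hre
    induction hre with
    | refl => exact hs
    | tail h1 h2 ih => exact hcl _ ih _ h2.1 h2.2.1 h2.2.2

theorem pvExSpec_unique {land V s P P'} (h : pvExSpec land V s P) (h' : pvExSpec land V s P') :
    P = P' := by
  ext c
  rw [pvExSpec_mem_iff h, pvExSpec_mem_iff h']

theorem pvReach_one {land V s c} (hs : pvOne land s) (h : pvReach land V s c) : pvOne land c := by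
  induction h with
  | refl => exact hs
  | tail h1 h2 _ => exact h2.2.1

-- column extrema of a component
def pvColsMin (P : Finset (Int × Int)) : WithTop Int := (P.image Prod.snd).min
def pvColsMax (P : Finset (Int × Int)) : WithBot Int := (P.image Prod.snd).max

theorem pvColsMin_insert (c : Int × Int) (P : Finset (Int × Int)) :
    pvColsMin (insert c P) = min (c.2 : WithTop Int) (pvColsMin P) := by
  rw [pvColsMin, Finset.image_insert, Finset.min_insert]; rfl

theorem pvColsMax_insert (c : Int × Int) (P : Finset (Int × Int)) :
    pvColsMax (insert c P) = max (c.2 : WithBot Int) (pvColsMax P) := by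
  rw [pvColsMax, Finset.image_insert, Finset.max_insert]; rfl

theorem pvColsMin_singleton (c : Int × Int) : pvColsMin {c} = (c.2 : WithTop Int) := by
  rw [pvColsMin, Finset.image_singleton, Finset.min_singleton]
theorem pvColsMax_singleton (c : Int × Int) : pvColsMax {c} = (c.2 : WithBot Int) := by
  rw [pvColsMax, Finset.image_singleton, Finset.max_singleton]

-- the in-bounds cells, for the fuel bound
def pvCells (land : List (List Int)) : Finset (Int × Int) :=
  (Finset.range (pvN land).toNat ×ˢ Finset.range (pvM land).toNat).image
    (fun p => ((p.1 : Int), (p.2 : Int)))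

theorem mem_pvCells {land : List (List Int)} {c : Int × Int} :
    c ∈ pvCells land ↔ pvInB land c := by
  obtain ⟨x, y⟩ := c
  simp only [pvCells, Finset.mem_image, Finset.mem_product, Finset.mem_range, pvInB, Prod.mk.injEq,
    Prod.exists]
  constructor
  · rintro ⟨a, b, ⟨ha, hb⟩, rfl, rfl⟩
    refine ⟨by positivity, ?_, by positivity, ?_⟩ <;> omega
  · rintro ⟨hx, hxn, hy, hym⟩
    exact ⟨x.toNat, y.toNat, ⟨by omega, by omega⟩, by omega, by omega⟩

theorem card_pvCells (land : List (List Int)) :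
    (pvCells land).card = (pvN land).toNat * (pvM land).toNat := by
  rw [pvCells, Finset.card_image_of_injective, Finset.card_product, Finset.card_range,
    Finset.card_range]
  intro p q h
  simp only [Prod.mk.injEq] at h
  exact Prod.ext (by exact_mod_cast h.1) (by exact_mod_cast h.2)
-- ===== visited representations =====
-- generic Nat-indexed read of a matrix (what pvLandGet does on nonnegative indices)
def pvMGet (vis : List (List Int)) (i j : Nat) : Int := (vis.getD i []).getD j 0

theorem pvPyGetD_nonneg {α : Type} (xs : List α) (i : Int) (d : α) (h : 0 ≤ i) :
    PySem.List.pyGetD xs i d = xs.getD i.toNat d := by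
  rcases lt_or_ge i (xs.length : Int) with h1 | h1
  · rw [PySem.List.pyGetD_eq_getElem xs d h h1, List.getD_eq_getElem xs d (by omega)]
  · rw [PySem.List.pyGetD_of_none xs i d, List.getD_eq_default xs d (by omega)]
    rw [PySem.List.pyGet?_eq_none_iff]
    intro hcon
    unfold PySem.Raise.InRange at hcon
    omega

theorem pvLandGet_eq_mget (vis : List (List Int)) (x y : Int) (hx : 0 ≤ x) (hy : 0 ≤ y) :
    pvLandGet vis x y = pvMGet vis x.toNat y.toNat := by
  rw [pvLandGet, pvPyGetD_nonneg vis x [] hx, pvPyGetD_nonneg _ y 0 hy, pvMGet]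

theorem pvRow_set_self (vis : List (List Int)) (r : List Int) (i : Nat) (hi : i < vis.length) :
    (vis.set i r).getD i [] = r := by
  rw [List.getD_eq_getElem?_getD, List.getElem?_set, if_pos rfl, if_pos hi, Option.getD_some]

theorem pvRow_set_ne (vis : List (List Int)) (r : List Int) (i i' : Nat) (h : i ≠ i') :
    (vis.set i r).getD i' [] = vis.getD i' [] := by
  rw [List.getD_eq_getElem?_getD, List.getElem?_set, if_neg h, ← List.getD_eq_getElem?_getD]

theorem pvEntry_set_self (row : List Int) (j : Nat) (hj : j < row.length) :
    (row.set j 1).getD j 0 = 1 := by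
  rw [List.getD_eq_getElem?_getD, List.getElem?_set, if_pos rfl, if_pos hj, Option.getD_some]

theorem pvEntry_set_ne (row : List Int) (j j' : Nat) (h : j ≠ j') :
    (row.set j 1).getD j' 0 = row.getD j' 0 := by
  rw [List.getD_eq_getElem?_getD, List.getElem?_set, if_neg h, ← List.getD_eq_getElem?_getD]

theorem pvMGet_set_self (vis : List (List Int)) (i j : Nat) (hi : i < vis.length)
    (hj : j < (vis.getD i []).length) :
    pvMGet (vis.set i ((vis.getD i []).set j 1)) i j = 1 := by
  rw [pvMGet, pvRow_set_self vis _ i hi, pvEntry_set_self _ j hj]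

theorem pvMGet_set_ne (vis : List (List Int)) (i j i' j' : Nat) (h : i ≠ i' ∨ j ≠ j') :
    pvMGet (vis.set i ((vis.getD i []).set j 1)) i' j' = pvMGet vis i' j' := by
  rcases eq_or_ne i i' with rfl | hne
  · have hj : j ≠ j' := by tauto
    rw [pvMGet, pvMGet]
    by_cases hi : i < vis.length
    · rw [pvRow_set_self vis _ i hi, pvEntry_set_ne _ j j' hj]
    · rw [List.set_eq_of_length_le (by omega)]
  · rw [pvMGet, pvMGet, pvRow_set_ne vis _ i i' hne]

def pvVisRep (land : List (List Int)) (vis : List (List Int)) (S : Finset (Int × Int)) : Prop :=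
  vis.length = (pvN land).toNat ∧ (∀ row ∈ vis, row.length = (pvM land).toNat) ∧
  ∀ c : Int × Int, pvInB land c → pvLandGet vis c.1 c.2 = if c ∈ S then 1 else 0

def pvSeenRep (seen : List (Int × Int)) (S : Finset (Int × Int)) : Prop :=
  ∀ c : Int × Int, c ∈ seen ↔ c ∈ S

theorem pvSeenRep_contains {seen : List (Int × Int)} {S : Finset (Int × Int)} {c : Int × Int}
    (h : pvSeenRep seen S) : PySem.Set.contains seen c = false ↔ c ∉ S := by
  rw [← h c, ← PySem.Set.contains_iff seen c]
  cases PySem.Set.contains seen c <;> simp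

theorem pvSeenRep_add {seen : List (Int × Int)} {S : Finset (Int × Int)} {c : Int × Int}
    (h : pvSeenRep seen S) : pvSeenRep (PySem.Set.add seen c) (insert c S) := by
  intro d
  rw [PySem.Set.mem_add, Finset.mem_insert, h d]
  tauto

theorem pvVisRep_set {land vis : List (List Int)} {S : Finset (Int × Int)} {c : Int × Int}
    (h : pvVisRep land vis S) (hin : pvInB land c) :
    pvVisRep land (pvVisSet vis c.1 c.2) (insert c S) := by
  obtain ⟨hlen, hrow, hget⟩ := h
  obtain ⟨hx0, hxn, hy0, hym⟩ := hin
  have hx : c.1.toNat < vis.length := by omega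
  have hrowc : (vis.getD c.1.toNat []).length = (pvM land).toNat := by
    rw [List.getD_eq_getElem vis [] hx]; exact hrow _ (vis.getElem_mem hx)
  refine ⟨by simp [pvVisSet, hlen], ?_, ?_⟩
  · intro row hr
    rcases List.mem_or_eq_of_mem_set hr with h1 | h1
    · exact hrow _ h1
    · rw [h1, List.length_set, hrowc]
  · intro d hd
    have hd' := hd
    obtain ⟨hdx, hdxn, hdy, hdym⟩ := hd'
    rw [pvLandGet_eq_mget _ _ _ hdx hdy, pvVisSet]
    by_cases hdc : d = c
    · subst hdc
      rw [pvMGet_set_self vis _ _ hx (by omega)]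
      simp
    · have hne : d.1.toNat ≠ c.1.toNat ∨ d.2.toNat ≠ c.2.toNat := by
        by_contra hcon
        push Not at hcon
        exact hdc (Prod.ext (by omega) (by omega))
      rw [pvMGet_set_ne vis _ _ _ _ (by tauto), ← pvLandGet_eq_mget _ _ _ hdx hdy,
        hget d hd]
      simp [Finset.mem_insert, hdc]

theorem pvVisRep_get {land vis : List (List Int)} {S : Finset (Int × Int)} {c : Int × Int}
    (h : pvVisRep land vis S) (hin : pvInB land c) :
    (pvLandGet vis c.1 c.2 = 0 ↔ c ∉ S) := by
  rw [h.2.2 c hin]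
  by_cases hc : c ∈ S <;> simp [hc]
-- ===== the neighbour scans =====
def pvNbrsA (x y : Int) : List (Int × Int) := [(x, y + 1), (x, y - 1), (x + 1, y), (x - 1, y)]
def pvNbrsB (x y : Int) : List (Int × Int) := [(x + 1, y), (x - 1, y), (x, y + 1), (x, y - 1)]

theorem mem_pvNbrsA {x y : Int} {b : Int × Int} : b ∈ pvNbrsA x y ↔ pvAdj (x, y) b := by
  simp [pvNbrsA, pvAdj]

theorem mem_pvNbrsB {x y : Int} {b : Int × Int} : b ∈ pvNbrsB x y ↔ pvAdj (x, y) b := by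
  simp [pvNbrsB, pvAdj]; tauto

def pvStepA (land : List (List Int)) (st : List (List Int) × List (Int × Int)) (c : Int × Int) :
    List (List Int) × List (Int × Int) :=
  if c.1 < 0 ∨ c.2 < 0 ∨ pvN land ≤ c.1 ∨ pvM land ≤ c.2 then st
  else if pvLandGet st.1 c.1 c.2 = 0 ∧ pvLandGet land c.1 c.2 = 1 then
    (pvVisSet st.1 c.1 c.2, st.2 ++ [c])
  else st

theorem pvBfsScan_eq (land : List (List Int)) (x y : Int)
    (st : List (List Int) × List (Int × Int)) :
    pvBfsScan land x y st = (pvNbrsA x y).foldl (pvStepA land) st := by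
  rw [pvBfsScan, show PySem.List.pyRange 0 4 1 = [0, 1, 2, 3] from rfl]
  have d0 : PySem.List.pyGetD pvDxA 0 0 = 0 := rfl
  have d1 : PySem.List.pyGetD pvDxA 1 0 = 0 := rfl
  have d2 : PySem.List.pyGetD pvDxA 2 0 = 1 := rfl
  have d3 : PySem.List.pyGetD pvDxA 3 0 = -1 := rfl
  have e0 : PySem.List.pyGetD pvDyA 0 0 = 1 := rfl
  have e1 : PySem.List.pyGetD pvDyA 1 0 = -1 := rfl
  have e2 : PySem.List.pyGetD pvDyA 2 0 = 0 := rfl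
  have e3 : PySem.List.pyGetD pvDyA 3 0 = 0 := rfl
  simp only [List.foldl, pvNbrsA, pvStepA, d0, d1, d2, d3, e0, e1, e2, e3,
    add_zero, ← sub_eq_add_neg]

theorem pvScanA_spec (land : List (List Int)) :
    ∀ (cands : List (Int × Int)) (vis : List (List Int)) (q : List (Int × Int))
      (S : Finset (Int × Int)), pvVisRep land vis S →
    ∃ vis' L, cands.foldl (pvStepA land) (vis, q) = (vis', q ++ L) ∧
      pvVisRep land vis' (S ∪ L.toFinset) ∧
      (∀ c ∈ L, c ∈ cands ∧ pvOne land c ∧ c ∉ S) ∧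
      (∀ c ∈ cands, pvOne land c → c ∈ S ∨ c ∈ L) ∧ L.Nodup := by
  intro cands
  induction cands with
  | nil =>
    intro vis q S h
    exact ⟨vis, [], by simp, by simpa using h, by simp, by simp, by simp⟩
  | cons c cs ih =>
    intro vis q S h
    by_cases hc : pvOne land c ∧ c ∉ S
    · have hin : pvInB land c := hc.1.1
      have hstep : pvStepA land (vis, q) c = (pvVisSet vis c.1 c.2, q ++ [c]) := by
        obtain ⟨⟨h1, h2, h3, h4⟩, h5⟩ := hc.1
        rw [pvStepA, if_neg (by push Not; exact ⟨by omega, by omega, by omega, by omega⟩),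
          if_pos ⟨(pvVisRep_get h hin).2 hc.2, h5⟩]
      obtain ⟨vis', L, he, hrep, hl, hcover, hnd⟩ :=
        ih (pvVisSet vis c.1 c.2) (q ++ [c]) (insert c S) (pvVisRep_set h hin)
      refine ⟨vis', c :: L, ?_, ?_, ?_, ?_, ?_⟩
      · rw [List.foldl_cons, hstep, he, List.append_assoc, List.singleton_append]
      · have : S ∪ (c :: L).toFinset = insert c S ∪ L.toFinset := by
          ext a; simp [Finset.mem_insert, Finset.mem_union]; try tauto
        rw [this]; exact hrep
      · intro d hd
        rcases List.mem_cons.mp hd with rfl | hd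
        · exact ⟨List.mem_cons_self, hc.1, hc.2⟩
        · obtain ⟨hd1, hd2, hd3⟩ := hl d hd
          exact ⟨List.mem_cons_of_mem _ hd1, hd2, fun hmem => hd3 (Finset.mem_insert_of_mem hmem)⟩
      · intro d hd hone
        rcases List.mem_cons.mp hd with rfl | hd
        · exact Or.inr List.mem_cons_self
        · rcases hcover d hd hone with hmem | hmem
          · rcases Finset.mem_insert.mp hmem with rfl | hmem
            · exact Or.inr List.mem_cons_self
            · exact Or.inl hmem
          · exact Or.inr (List.mem_cons_of_mem _ hmem)
      · refine List.nodup_cons.mpr ⟨?_, hnd⟩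
        intro hmem
        exact (hl c hmem).2.2 (Finset.mem_insert_self c S)
    · have hstep : pvStepA land (vis, q) c = (vis, q) := by
        rw [pvStepA]
        by_cases hb : c.1 < 0 ∨ c.2 < 0 ∨ pvN land ≤ c.1 ∨ pvM land ≤ c.2
        · rw [if_pos hb]
        · rw [if_neg hb]
          have hin : pvInB land c := by push Not at hb; exact ⟨by omega, by omega, by omega, by omega⟩
          rw [if_neg]
          intro ⟨hv, hl1⟩
          exact hc ⟨⟨hin, hl1⟩, (pvVisRep_get h hin).1 hv⟩
      obtain ⟨vis', L, he, hrep, hl, hcover, hnd⟩ := ih vis q S h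
      refine ⟨vis', L, by rw [List.foldl_cons, hstep, he], hrep, ?_, ?_, hnd⟩
      · intro d hd
        obtain ⟨hd1, hd2, hd3⟩ := hl d hd
        exact ⟨List.mem_cons_of_mem _ hd1, hd2, hd3⟩
      · intro d hd hone
        rcases List.mem_cons.mp hd with rfl | hd
        · left
          by_contra hmem
          exact hc ⟨hone, hmem⟩
        · exact hcover d hd hone

theorem pvScanB_spec (land : List (List Int)) :
    ∀ (cands : List (Int × Int)) (seen : List (Int × Int)) (q : List (Int × Int))
      (S : Finset (Int × Int)), pvSeenRep seen S →
    ∃ seen' L, cands.foldl (pvDfsStep land) (seen, q) = (seen', q ++ L) ∧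
      pvSeenRep seen' (S ∪ L.toFinset) ∧
      (∀ c ∈ L, c ∈ cands ∧ pvOne land c ∧ c ∉ S) ∧
      (∀ c ∈ cands, pvOne land c → c ∈ S ∨ c ∈ L) ∧ L.Nodup := by
  intro cands
  induction cands with
  | nil =>
    intro seen q S h
    exact ⟨seen, [], by simp, by simpa using h, by simp, by simp, by simp⟩
  | cons c cs ih =>
    intro seen q S h
    by_cases hc : pvOne land c ∧ c ∉ S
    · have hstep : pvDfsStep land (seen, q) c = (PySem.Set.add seen c, q ++ [c]) := by
        obtain ⟨⟨h1, h2, h3, h4⟩, h5⟩ := hc.1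
        rw [pvDfsStep, if_pos ⟨h1, h2, h3, h4, h5, (pvSeenRep_contains h).2 hc.2⟩]
      obtain ⟨seen', L, he, hrep, hl, hcover, hnd⟩ :=
        ih (PySem.Set.add seen c) (q ++ [c]) (insert c S) (pvSeenRep_add h)
      refine ⟨seen', c :: L, ?_, ?_, ?_, ?_, ?_⟩
      · rw [List.foldl_cons, hstep, he, List.append_assoc, List.singleton_append]
      · have : S ∪ (c :: L).toFinset = insert c S ∪ L.toFinset := by
          ext a; simp [Finset.mem_insert, Finset.mem_union]; try tauto
        rw [this]; exact hrep
      · intro d hd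
        rcases List.mem_cons.mp hd with rfl | hd
        · exact ⟨List.mem_cons_self, hc.1, hc.2⟩
        · obtain ⟨hd1, hd2, hd3⟩ := hl d hd
          exact ⟨List.mem_cons_of_mem _ hd1, hd2, fun hmem => hd3 (Finset.mem_insert_of_mem hmem)⟩
      · intro d hd hone
        rcases List.mem_cons.mp hd with rfl | hd
        · exact Or.inr List.mem_cons_self
        · rcases hcover d hd hone with hmem | hmem
          · rcases Finset.mem_insert.mp hmem with rfl | hmem
            · exact Or.inr List.mem_cons_self
            · exact Or.inl hmem
          · exact Or.inr (List.mem_cons_of_mem _ hmem)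
      · refine List.nodup_cons.mpr ⟨?_, hnd⟩
        intro hmem
        exact (hl c hmem).2.2 (Finset.mem_insert_self c S)
    · have hstep : pvDfsStep land (seen, q) c = (seen, q) := by
        rw [pvDfsStep, if_neg]
        intro ⟨h1, h2, h3, h4, h5, h6⟩
        exact hc ⟨⟨⟨h1, h2, h3, h4⟩, h5⟩, (pvSeenRep_contains h).1 h6⟩
      obtain ⟨seen', L, he, hrep, hl, hcover, hnd⟩ := ih seen q S h
      refine ⟨seen', L, by rw [List.foldl_cons, hstep, he], hrep, ?_, ?_, hnd⟩
      · intro d hd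
        obtain ⟨hd1, hd2, hd3⟩ := hl d hd
        exact ⟨List.mem_cons_of_mem _ hd1, hd2, hd3⟩
      · intro d hd hone
        rcases List.mem_cons.mp hd with rfl | hd
        · left
          by_contra hmem
          exact hc ⟨hone, hmem⟩
        · exact hcover d hd hone
-- ===== the exploration loops =====
theorem pvLoopA_spec (land : List (List Int)) (V : Finset (Int × Int)) (s : Int × Int) :
    ∀ (fuel : Nat) (vis : List (List Int)) (q : List (Int × Int)) (count mn mx : Int)
      (P : Finset (Int × Int)),
      pvVisRep land vis (V ∪ P ∪ q.toFinset) →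
      q.Nodup →
      (∀ c ∈ q, c ∉ V ∧ c ∉ P) →
      (∀ c ∈ q, pvReach land V s c) →
      (∀ c ∈ P, pvReach land V s c) →
      (∀ a ∈ P, ∀ b, pvAdj a b → pvOne land b → (b ∈ V ∨ b ∈ P ∨ b ∈ q)) →
      count = (P.card : Int) →
      pvColsMin (insert s P) = (mn : WithTop Int) →
      pvColsMax (insert s P) = (mx : WithBot Int) →
      (s ∈ P ∨ s ∈ q) →
      2 * ((pvCells land) \ (V ∪ P ∪ q.toFinset)).card + q.length < fuel →
      ∃ Pf : Finset (Int × Int),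
        (pvBfsLoop land fuel (vis, q, count, mn, mx)).2.1 = [] ∧
        pvVisRep land (pvBfsLoop land fuel (vis, q, count, mn, mx)).1 (V ∪ Pf) ∧
        pvExSpec land V s Pf ∧
        (pvBfsLoop land fuel (vis, q, count, mn, mx)).2.2.1 = (Pf.card : Int) ∧
        pvColsMin Pf = ((pvBfsLoop land fuel (vis, q, count, mn, mx)).2.2.2.1 : WithTop Int) ∧
        pvColsMax Pf = ((pvBfsLoop land fuel (vis, q, count, mn, mx)).2.2.2.2 : WithBot Int) := by
  intro fuel
  induction fuel with
  | zero =>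
    intro vis q count mn mx P _ _ _ _ _ _ _ _ _ _ hfuel
    omega
  | succ fuel ih =>
    intro vis q count mn mx P hrep hnd hqVP hqR hPR hcl hcount hmn hmx hs hfuel
    match q with
    | [] =>
      refine ⟨P, rfl, ?_, ⟨?_, hPR, ?_⟩, ?_, ?_, ?_⟩
      · show pvVisRep land vis (V ∪ P)
        simpa using hrep
      · rcases hs with h | h
        · exact h
        · simp at h
      · intro a ha b hadj hone hbv
        rcases hcl a ha b hadj hone with h | h | h
        · exact absurd h hbv
        · exact h
        · simp at h
      · exact hcount
      · have : insert s P = P := Finset.insert_eq_self.mpr (by rcases hs with h | h; exact h; simp at h)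
        rw [← this, hmn]
        rfl
      · have : insert s P = P := Finset.insert_eq_self.mpr (by rcases hs with h | h; exact h; simp at h)
        rw [← this, hmx]
        rfl
    | (x, y) :: rest =>
      set c : Int × Int := (x, y) with hc
      have hcq : c ∈ (x, y) :: rest := List.mem_cons_self
      have hcV : c ∉ V := (hqVP c hcq).1
      have hcP : c ∉ P := (hqVP c hcq).2
      have hcrest : c ∉ rest := (List.nodup_cons.mp hnd).1
      -- unfold one loop iteration
      have hunfold : pvBfsLoop land (fuel + 1) (vis, (x, y) :: rest, count, mn, mx) =
          pvBfsLoop land fuel ((pvBfsScan land x y (vis, rest)).1,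
            (pvBfsScan land x y (vis, rest)).2, count + 1, min mn y, max mx y) := rfl
      rw [hunfold]
      -- the scan
      have hrep' : pvVisRep land vis (V ∪ P ∪ ((x, y) :: rest).toFinset) := hrep
      obtain ⟨vis', L, he, hrepL, hl, hcover, hndL⟩ :=
        pvScanA_spec land (pvNbrsA x y) vis rest (V ∪ P ∪ ((x, y) :: rest).toFinset) hrep'
      rw [pvBfsScan_eq, he]
      set S : Finset (Int × Int) := V ∪ P ∪ ((x, y) :: rest).toFinset with hS
      have hLS : ∀ d ∈ L, d ∉ S := fun d hd => (hl d hd).2.2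
      have hLone : ∀ d ∈ L, pvOne land d := fun d hd => (hl d hd).2.1
      have hLadj : ∀ d ∈ L, pvAdj c d := fun d hd => mem_pvNbrsA.mp (hl d hd).1
      -- new ghost state
      have hset : V ∪ insert c P ∪ (rest ++ L).toFinset = S ∪ L.toFinset := by
        ext a
        simp only [hS, Finset.mem_union, Finset.mem_insert, List.mem_toFinset, List.mem_append,
          List.mem_cons, hc]
        tauto
      have hcells : ∀ d ∈ L, d ∈ pvCells land := fun d hd => mem_pvCells.mpr (hLone d hd).1
      have happly := ih vis' (rest ++ L) (count + 1) (min mn y) (max mx y) (insert c P)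
        (by rw [hset]; exact hrepL)
        (by
          rw [List.nodup_append]
          refine ⟨(List.nodup_cons.mp hnd).2, hndL, ?_⟩
          intro a ha b hb hab
          subst hab
          exact hLS a hb (by
            simp only [hS, Finset.mem_union, List.mem_toFinset, List.mem_cons]
            tauto))
        (by
          intro d hd
          rcases List.mem_append.mp hd with hd | hd
          · have h1 := hqVP d (List.mem_cons_of_mem _ hd)
            refine ⟨h1.1, ?_⟩
            intro hmem
            rcases Finset.mem_insert.mp hmem with rfl | hmem
            · exact hcrest hd
            · exact h1.2 hmem
          · have := hLS d hd
            simp only [hS, Finset.mem_union, List.mem_toFinset, not_or] at this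
            refine ⟨this.1.1, ?_⟩
            intro hmem
            rcases Finset.mem_insert.mp hmem with rfl | hmem
            · exact this.2 List.mem_cons_self
            · exact this.1.2 hmem)
        (by
          intro d hd
          rcases List.mem_append.mp hd with hd | hd
          · exact hqR d (List.mem_cons_of_mem _ hd)
          · refine Relation.ReflTransGen.tail (hqR c hcq) ?_
            have := hLS d hd
            simp only [hS, Finset.mem_union, List.mem_toFinset, not_or] at this
            exact ⟨hLadj d hd, hLone d hd, this.1.1⟩)
        (by
          intro d hd
          rcases Finset.mem_insert.mp hd with rfl | hd
          · exact hqR c hcq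
          · exact hPR d hd)
        (by
          intro a ha b hadj hone
          rcases Finset.mem_insert.mp ha with rfl | ha
          · have hb : b ∈ pvNbrsA x y := mem_pvNbrsA.mpr hadj
            rcases hcover b hb hone with hmem | hmem
            · simp only [hS, Finset.mem_union, List.mem_toFinset, List.mem_cons] at hmem
              rcases hmem with (hmem | hmem) | (hmem | hmem)
              · exact Or.inl hmem
              · exact Or.inr (Or.inl (Finset.mem_insert_of_mem hmem))
              · exact Or.inr (Or.inl (by rw [hmem]; exact Finset.mem_insert_self _ _))
              · exact Or.inr (Or.inr (List.mem_append_left _ hmem))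
            · exact Or.inr (Or.inr (List.mem_append_right _ hmem))
          · rcases hcl a ha b hadj hone with h | h | h
            · exact Or.inl h
            · exact Or.inr (Or.inl (Finset.mem_insert_of_mem h))
            · rcases List.mem_cons.mp h with rfl | h
              · exact Or.inr (Or.inl (Finset.mem_insert_self _ _))
              · exact Or.inr (Or.inr (List.mem_append_left _ h)))
        (by rw [Finset.card_insert_of_notMem hcP]; push_cast [hcount]; ring)
        (by
          rw [Finset.insert_comm, pvColsMin_insert c, hmn]
          show min ((y : WithTop Int)) ((mn : Int) : WithTop Int) = ((min mn y : Int) : WithTop Int)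
          rw [← WithTop.coe_min]
          rw [min_comm])
        (by
          rw [Finset.insert_comm, pvColsMax_insert c, hmx]
          show max ((y : WithBot Int)) ((mx : Int) : WithBot Int) = ((max mx y : Int) : WithBot Int)
          rw [← WithBot.coe_max]
          rw [max_comm])
        (by
          rcases hs with h | h
          · exact Or.inl (Finset.mem_insert_of_mem h)
          · rcases List.mem_cons.mp h with rfl | h
            · exact Or.inl (Finset.mem_insert_self _ _)
            · exact Or.inr (List.mem_append_left _ h))
        (by
          -- fuel accounting
          have hU : V ∪ insert c P ∪ (rest ++ L).toFinset = S ∪ L.toFinset := hset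
          have hsub : L.toFinset ⊆ pvCells land \ S := by
            intro a ha
            rw [Finset.mem_sdiff]
            have haL := List.mem_toFinset.mp ha
            exact ⟨hcells a haL, hLS a haL⟩
          have hsplit : pvCells land \ (S ∪ L.toFinset) = (pvCells land \ S) \ L.toFinset := by
            ext a; simp only [Finset.mem_sdiff, Finset.mem_union]; tauto
          have hcard : (pvCells land \ (S ∪ L.toFinset)).card =
              (pvCells land \ S).card - L.toFinset.card := by
            rw [hsplit, Finset.card_sdiff, Finset.inter_eq_left.mpr hsub]
          have hLlen : L.toFinset.card = L.length := List.toFinset_card_of_nodup hndL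
          have hle : L.toFinset.card ≤ (pvCells land \ S).card := Finset.card_le_card hsub
          have hqlen : (rest ++ L).length = rest.length + L.length := List.length_append
          rw [hU, hcard, hLlen, hqlen]
          have hold : 2 * ((pvCells land) \ S).card + ((x, y) :: rest).length < fuel + 1 := hfuel
          simp only [List.length_cons] at hold
          omega)
      exact happly
theorem pvLoopB_spec (land : List (List Int)) (V : Finset (Int × Int)) (s : Int × Int) :
    ∀ (fuel : Nat) (seen : List (Int × Int)) (q : List (Int × Int)) (size lo hi : Int)
      (P : Finset (Int × Int)),
      pvSeenRep seen (V ∪ P ∪ q.toFinset) →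
      q.Nodup →
      (∀ c ∈ q, c ∉ V ∧ c ∉ P) →
      (∀ c ∈ q, pvReach land V s c) →
      (∀ c ∈ P, pvReach land V s c) →
      (∀ a ∈ P, ∀ b, pvAdj a b → pvOne land b → (b ∈ V ∨ b ∈ P ∨ b ∈ q)) →
      size = (P.card : Int) →
      pvColsMin (insert s P) = (lo : WithTop Int) →
      pvColsMax (insert s P) = (hi : WithBot Int) →
      (s ∈ P ∨ s ∈ q) →
      2 * ((pvCells land) \ (V ∪ P ∪ q.toFinset)).card + q.length < fuel →
      ∃ Pf : Finset (Int × Int),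
        pvSeenRep (pvDfsLoop land fuel (seen, q, size, lo, hi)).1 (V ∪ Pf) ∧
        pvExSpec land V s Pf ∧
        (pvDfsLoop land fuel (seen, q, size, lo, hi)).2.1 = (Pf.card : Int) ∧
        pvColsMin Pf = ((pvDfsLoop land fuel (seen, q, size, lo, hi)).2.2.1 : WithTop Int) ∧
        pvColsMax Pf = ((pvDfsLoop land fuel (seen, q, size, lo, hi)).2.2.2 : WithBot Int) := by
  intro fuel
  induction fuel with
  | zero =>
    intro seen q size lo hi P _ _ _ _ _ _ _ _ _ _ hfuel
    omega
  | succ fuel ih =>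
    intro seen q size lo hi P hrep hnd hqVP hqR hPR hcl hsize hlo hhi hs hfuel
    rcases List.eq_nil_or_concat q with rfl | ⟨init, c, rfl⟩
    · refine ⟨P, ?_, ⟨?_, hPR, ?_⟩, ?_, ?_, ?_⟩
      · show pvSeenRep seen (V ∪ P)
        simpa using hrep
      · rcases hs with h | h
        · exact h
        · simp at h
      · intro a ha b hadj hone hbv
        rcases hcl a ha b hadj hone with h | h | h
        · exact absurd h hbv
        · exact h
        · simp at h
      · exact hsize
      · have : insert s P = P := Finset.insert_eq_self.mpr
          (by rcases hs with h | h; exact h; simp at h)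
        rw [← this, hlo]
        rfl
      · have : insert s P = P := Finset.insert_eq_self.mpr
          (by rcases hs with h | h; exact h; simp at h)
        rw [← this, hhi]
        rfl
    · rw [List.concat_eq_append] at hrep hnd hqVP hqR hcl hs hfuel ⊢
      obtain ⟨x, y⟩ := c
      set c : Int × Int := (x, y) with hc
      have hcq : c ∈ init ++ [c] := List.mem_append_right _ List.mem_cons_self
      have hcV : c ∉ V := (hqVP c hcq).1
      have hcP : c ∉ P := (hqVP c hcq).2
      have hcinit : c ∉ init := by
        rcases List.nodup_append.mp hnd with ⟨_, _, hdisj⟩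
        intro hmem
        exact hdisj c hmem c List.mem_cons_self rfl
      have hunfold : pvDfsLoop land (fuel + 1) (seen, init ++ [c], size, lo, hi) =
          pvDfsLoop land fuel
            (((pvNbrsB x y).foldl (pvDfsStep land) (seen, (init ++ [c]).dropLast)).1,
             ((pvNbrsB x y).foldl (pvDfsStep land) (seen, (init ++ [c]).dropLast)).2,
             size + 1, min lo y, max hi y) := by
        rw [pvDfsLoop]
        rw [List.getLast?_concat]
        rfl
      rw [hunfold, List.dropLast_concat]
      obtain ⟨seen', L, he, hrepL, hl, hcover, hndL⟩ :=
        pvScanB_spec land (pvNbrsB x y) seen init (V ∪ P ∪ (init ++ [c]).toFinset) hrep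
      rw [he]
      set S : Finset (Int × Int) := V ∪ P ∪ (init ++ [c]).toFinset with hS
      have hLS : ∀ d ∈ L, d ∉ S := fun d hd => (hl d hd).2.2
      have hLone : ∀ d ∈ L, pvOne land d := fun d hd => (hl d hd).2.1
      have hLadj : ∀ d ∈ L, pvAdj c d := fun d hd => mem_pvNbrsB.mp (hl d hd).1
      have hset : V ∪ insert c P ∪ (init ++ L).toFinset = S ∪ L.toFinset := by
        ext a
        simp only [hS, Finset.mem_union, Finset.mem_insert, List.mem_toFinset, List.mem_append,
          List.mem_cons, hc]
        tauto
      have hcells : ∀ d ∈ L, d ∈ pvCells land := fun d hd => mem_pvCells.mpr (hLone d hd).1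
      have happly := ih seen' (init ++ L) (size + 1) (min lo y) (max hi y) (insert c P)
        (by rw [hset]; exact hrepL)
        (by
          rw [List.nodup_append]
          refine ⟨(List.nodup_append.mp hnd).1, hndL, ?_⟩
          intro a ha b hb hab
          subst hab
          exact hLS a hb (by
            simp only [hS, Finset.mem_union, List.mem_toFinset, List.mem_append]
            tauto))
        (by
          intro d hd
          rcases List.mem_append.mp hd with hd | hd
          · have h1 := hqVP d (List.mem_append_left _ hd)
            refine ⟨h1.1, ?_⟩
            intro hmem
            rcases Finset.mem_insert.mp hmem with rfl | hmem
            · exact hcinit hd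
            · exact h1.2 hmem
          · have := hLS d hd
            simp only [hS, Finset.mem_union, List.mem_toFinset, List.mem_append, not_or] at this
            refine ⟨this.1.1, ?_⟩
            intro hmem
            rcases Finset.mem_insert.mp hmem with rfl | hmem
            · exact this.2.2 List.mem_cons_self
            · exact this.1.2 hmem)
        (by
          intro d hd
          rcases List.mem_append.mp hd with hd | hd
          · exact hqR d (List.mem_append_left _ hd)
          · refine Relation.ReflTransGen.tail (hqR c hcq) ?_
            have := hLS d hd
            simp only [hS, Finset.mem_union, List.mem_toFinset, List.mem_append, not_or] at this
            exact ⟨hLadj d hd, hLone d hd, this.1.1⟩)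
        (by
          intro d hd
          rcases Finset.mem_insert.mp hd with rfl | hd
          · exact hqR c hcq
          · exact hPR d hd)
        (by
          intro a ha b hadj hone
          rcases Finset.mem_insert.mp ha with rfl | ha
          · have hb : b ∈ pvNbrsB x y := mem_pvNbrsB.mpr hadj
            rcases hcover b hb hone with hmem | hmem
            · simp only [hS, Finset.mem_union, List.mem_toFinset, List.mem_append,
                List.mem_cons] at hmem
              rcases hmem with (hmem | hmem) | (hmem | hmem)
              · exact Or.inl hmem
              · exact Or.inr (Or.inl (Finset.mem_insert_of_mem hmem))
              · exact Or.inr (Or.inr (List.mem_append_left _ hmem))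
              · rcases hmem with hmem | hmem
                · exact Or.inr (Or.inl (by rw [hmem]; exact Finset.mem_insert_self _ _))
                · simp at hmem
            · exact Or.inr (Or.inr (List.mem_append_right _ hmem))
          · rcases hcl a ha b hadj hone with h | h | h
            · exact Or.inl h
            · exact Or.inr (Or.inl (Finset.mem_insert_of_mem h))
            · rcases List.mem_append.mp h with h | h
              · exact Or.inr (Or.inr (List.mem_append_left _ h))
              · rcases List.mem_cons.mp h with rfl | h
                · exact Or.inr (Or.inl (Finset.mem_insert_self _ _))
                · simp at h)
        (by rw [Finset.card_insert_of_notMem hcP]; push_cast [hsize]; ring)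
        (by
          rw [Finset.insert_comm, pvColsMin_insert c, hlo]
          show min ((y : WithTop Int)) ((lo : Int) : WithTop Int) = ((min lo y : Int) : WithTop Int)
          rw [← WithTop.coe_min, min_comm])
        (by
          rw [Finset.insert_comm, pvColsMax_insert c, hhi]
          show max ((y : WithBot Int)) ((hi : Int) : WithBot Int) = ((max hi y : Int) : WithBot Int)
          rw [← WithBot.coe_max, max_comm])
        (by
          rcases hs with h | h
          · exact Or.inl (Finset.mem_insert_of_mem h)
          · rcases List.mem_append.mp h with h | h
            · exact Or.inr (List.mem_append_left _ h)
            · rcases List.mem_cons.mp h with rfl | h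
              · exact Or.inl (Finset.mem_insert_self _ _)
              · simp at h)
        (by
          have hsub : L.toFinset ⊆ pvCells land \ S := by
            intro a ha
            rw [Finset.mem_sdiff]
            have haL := List.mem_toFinset.mp ha
            exact ⟨hcells a haL, hLS a haL⟩
          have hsplit : pvCells land \ (S ∪ L.toFinset) = (pvCells land \ S) \ L.toFinset := by
            ext a; simp only [Finset.mem_sdiff, Finset.mem_union]; tauto
          have hcard : (pvCells land \ (S ∪ L.toFinset)).card =
              (pvCells land \ S).card - L.toFinset.card := by
            rw [hsplit, Finset.card_sdiff, Finset.inter_eq_left.mpr hsub]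
          have hLlen : L.toFinset.card = L.length := List.toFinset_card_of_nodup hndL
          have hle : L.toFinset.card ≤ (pvCells land \ S).card := Finset.card_le_card hsub
          have hqlen : (init ++ L).length = init.length + L.length := List.length_append
          rw [hset, hcard, hLlen, hqlen]
          have hold : 2 * ((pvCells land) \ S).card + (init ++ [c]).length < fuel + 1 := hfuel
          simp only [List.length_append, List.length_cons, List.length_nil] at hold ⊢
          omega)
      exact happly
-- ===== per-seed wrappers =====
theorem pvInit_union (V : Finset (Int × Int)) (s : Int × Int) :
    insert s V = V ∪ (∅ : Finset (Int × Int)) ∪ ([s] : List (Int × Int)).toFinset := by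
  ext a; simp [Finset.mem_insert]

theorem pvBfsA_spec (land : List (List Int)) (V : Finset (Int × Int)) (a b : Int)
    (vis : List (List Int)) (result : List Int)
    (hrep : pvVisRep land vis V) (hone : pvOne land (a, b)) (hV : (a, b) ∉ V) :
    ∃ (P : Finset (Int × Int)) (mn mx : Int),
      pvExSpec land V (a, b) P ∧
      pvVisRep land (pvBfsA land a b vis result).1 (V ∪ P) ∧
      pvColsMin P = (mn : WithTop Int) ∧ pvColsMax P = (mx : WithBot Int) ∧
      (pvBfsA land a b vis result).2 =
        (PySem.List.pyRange mn (mx + 1) 1).foldl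
          (fun res i => res.set i.toNat (res.getD i.toNat 0 + (P.card : Int))) result := by
  have hfuel : 2 * ((pvCells land) \ (V ∪ (∅ : Finset (Int × Int)) ∪
      ([(a, b)] : List (Int × Int)).toFinset)).card + ([(a, b)] : List (Int × Int)).length <
      2 * (pvN land).toNat * (pvM land).toNat + 2 := by
    have h1 : ((pvCells land) \ (V ∪ (∅ : Finset (Int × Int)) ∪
        ([(a, b)] : List (Int × Int)).toFinset)).card ≤ (pvCells land).card :=
      Finset.card_le_card (Finset.sdiff_subset)
    have h2 := card_pvCells land
    have h3 : 2 * (pvN land).toNat * (pvM land).toNat =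
        2 * ((pvN land).toNat * (pvM land).toNat) := Nat.mul_assoc 2 _ _
    simp only [List.length_cons, List.length_nil]
    rw [h3]
    omega
  obtain ⟨Pf, hempty, hrepf, hexf, hcountf, hmnf, hmxf⟩ :=
    pvLoopA_spec land V (a, b) (2 * (pvN land).toNat * (pvM land).toNat + 2)
      (pvVisSet vis a b) [(a, b)] 0 b b ∅
      (by rw [← pvInit_union]; exact pvVisRep_set hrep hone.1)
      (by simp)
      (by intro c hc; rcases List.mem_cons.mp hc with rfl | hc; exact ⟨hV, by simp⟩; simp at hc)
      (by intro c hc; rcases List.mem_cons.mp hc with rfl | hc; exact Relation.ReflTransGen.refl; simp at hc)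
      (by simp)
      (by simp)
      (by simp)
      (by rw [Finset.insert_empty, pvColsMin_singleton])
      (by rw [Finset.insert_empty, pvColsMax_singleton])
      (by simp)
      hfuel
  refine ⟨Pf, (pvBfsLoop land (2 * (pvN land).toNat * (pvM land).toNat + 2)
      (pvVisSet vis a b, [(a, b)], 0, b, b)).2.2.2.1,
    (pvBfsLoop land (2 * (pvN land).toNat * (pvM land).toNat + 2)
      (pvVisSet vis a b, [(a, b)], 0, b, b)).2.2.2.2, hexf, hrepf, hmnf, hmxf, ?_⟩
  rw [pvBfsA]
  rw [hcountf]

theorem pvDfsB_spec (land : List (List Int)) (V : Finset (Int × Int)) (a b : Int)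
    (seen : List (Int × Int))
    (hrep : pvSeenRep seen V) (_hone : pvOne land (a, b)) (hV : (a, b) ∉ V) :
    ∃ (P : Finset (Int × Int)),
      pvExSpec land V (a, b) P ∧
      pvSeenRep (pvDfsLoop land (2 * (pvN land).toNat * (pvM land).toNat + 2)
        (PySem.Set.add seen (a, b), [(a, b)], 0, b, b)).1 (V ∪ P) ∧
      (pvDfsLoop land (2 * (pvN land).toNat * (pvM land).toNat + 2)
        (PySem.Set.add seen (a, b), [(a, b)], 0, b, b)).2.1 = (P.card : Int) ∧
      pvColsMin P = ((pvDfsLoop land (2 * (pvN land).toNat * (pvM land).toNat + 2)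
        (PySem.Set.add seen (a, b), [(a, b)], 0, b, b)).2.2.1 : WithTop Int) ∧
      pvColsMax P = ((pvDfsLoop land (2 * (pvN land).toNat * (pvM land).toNat + 2)
        (PySem.Set.add seen (a, b), [(a, b)], 0, b, b)).2.2.2 : WithBot Int) := by
  have hfuel : 2 * ((pvCells land) \ (V ∪ (∅ : Finset (Int × Int)) ∪
      ([(a, b)] : List (Int × Int)).toFinset)).card + ([(a, b)] : List (Int × Int)).length <
      2 * (pvN land).toNat * (pvM land).toNat + 2 := by
    have h1 : ((pvCells land) \ (V ∪ (∅ : Finset (Int × Int)) ∪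
        ([(a, b)] : List (Int × Int)).toFinset)).card ≤ (pvCells land).card :=
      Finset.card_le_card (Finset.sdiff_subset)
    have h2 := card_pvCells land
    have h3 : 2 * (pvN land).toNat * (pvM land).toNat =
        2 * ((pvN land).toNat * (pvM land).toNat) := Nat.mul_assoc 2 _ _
    simp only [List.length_cons, List.length_nil]
    rw [h3]
    omega
  obtain ⟨Pf, hrepf, hexf, hcountf, hmnf, hmxf⟩ :=
    pvLoopB_spec land V (a, b) (2 * (pvN land).toNat * (pvM land).toNat + 2)
      (PySem.Set.add seen (a, b)) [(a, b)] 0 b b ∅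
      (by rw [← pvInit_union]; exact pvSeenRep_add hrep)
      (by simp)
      (by intro c hc; rcases List.mem_cons.mp hc with rfl | hc; exact ⟨hV, by simp⟩; simp at hc)
      (by intro c hc; rcases List.mem_cons.mp hc with rfl | hc; exact Relation.ReflTransGen.refl; simp at hc)
      (by simp)
      (by simp)
      (by simp)
      (by rw [Finset.insert_empty, pvColsMin_singleton])
      (by rw [Finset.insert_empty, pvColsMax_singleton])
      (by simp)
      hfuel
  exact ⟨Pf, hexf, hrepf, hcountf, hmnf, hmxf⟩

-- ===== the result-array update ('result[i] += count' over a range) =====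
theorem pvRangeAdd_spec (cnt hi : Int) :
    ∀ (k : Nat) (lo : Int) (res : List Int), (hi + 1 - lo).toNat = k → 0 ≤ lo →
      hi < (res.length : Int) →
      ((PySem.List.pyRange lo (hi + 1) 1).foldl
          (fun r i => r.set i.toNat (r.getD i.toNat 0 + cnt)) res).length = res.length ∧
      ∀ j : Nat, ((PySem.List.pyRange lo (hi + 1) 1).foldl
          (fun r i => r.set i.toNat (r.getD i.toNat 0 + cnt)) res).getD j 0 =
        res.getD j 0 + (if lo ≤ (j : Int) ∧ (j : Int) ≤ hi then cnt else 0) := by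
  intro k
  induction k with
  | zero =>
    intro lo res hk h0 hhi
    rw [PySem.List.pyRange_one_eq_nil (by omega)]
    refine ⟨rfl, ?_⟩
    intro j
    rw [if_neg (by omega), add_zero]
    rfl
  | succ k ihk =>
    intro lo res hk h0 hhi
    have hlt : lo < hi + 1 := by omega
    rw [PySem.List.pyRange_one_cons hlt, List.foldl_cons]
    have hlen1 : (res.set lo.toNat (res.getD lo.toNat 0 + cnt)).length = res.length :=
      List.length_set
    obtain ⟨hlenr, hgetr⟩ := ihk (lo + 1) (res.set lo.toNat (res.getD lo.toNat 0 + cnt))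
      (by omega) (by omega) (by rw [hlen1]; omega)
    refine ⟨by rw [hlenr, hlen1], ?_⟩
    intro j
    rw [hgetr j]
    have hset : (res.set lo.toNat (res.getD lo.toNat 0 + cnt)).getD j 0 =
        if lo.toNat = j then res.getD j 0 + cnt else res.getD j 0 := by
      rw [List.getD_eq_getElem?_getD, List.getElem?_set]
      by_cases hje : lo.toNat = j
      · subst hje
        simp [show lo.toNat < res.length by omega]
      · rw [if_neg hje, ← List.getD_eq_getElem?_getD, if_neg hje]
    rw [hset]
    split_ifs <;> omega

-- ===== the per-column sums =====
theorem pvSumC_append (comps : List (Int × Int × Int)) (t : Int × Int × Int) (c : Int) :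
    pvSumC (comps ++ [t]) c = pvSumC comps c + if t.2.1 ≤ c ∧ c ≤ t.2.2 then t.1 else 0 := by
  rw [pvSumC, pvSumC, List.filter_append, List.map_append, List.sum_append]
  by_cases h : t.2.1 ≤ c ∧ c ≤ t.2.2 <;> simp [h]

theorem pvSumC_nonneg (comps : List (Int × Int × Int)) (c : Int)
    (h : ∀ t ∈ comps, 0 ≤ t.1) : 0 ≤ pvSumC comps c := by
  refine List.sum_nonneg ?_
  intro x hx
  simp only [List.mem_map, List.mem_filter] at hx
  obtain ⟨t, ⟨ht, _⟩, rfl⟩ := hx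
  exact h t ht

theorem pvSumC_high (comps : List (Int × Int × Int)) (c : Int)
    (h : ∀ t ∈ comps, t.2.2 < c) : pvSumC comps c = 0 := by
  rw [pvSumC]
  have : comps.filter (fun t => decide (t.2.1 ≤ c ∧ c ≤ t.2.2)) = [] := by
    rw [List.filter_eq_nil_iff]
    intro t ht
    have := h t ht
    simp only [decide_eq_true_eq, not_and]
    intro _
    omega
  rw [this]
  rfl

-- ===== relating the two outer loops =====
theorem pvFoldlRel {α β γ : Type} (R : α → β → Prop) (f : α → γ → α) (g : β → γ → β) :
    ∀ (l : List γ) (a : α) (b : β), R a b → (∀ x ∈ l, ∀ a b, R a b → R (f a x) (g b x)) →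
      R (l.foldl f a) (l.foldl g b) := by
  intro l
  induction l with
  | nil => intro a b h _; exact h
  | cons x xs ih =>
    intro a b h hstep
    exact ih (f a x) (g b x) (hstep x List.mem_cons_self a b h)
      (fun z hz => hstep z (List.mem_cons_of_mem _ hz))

def pvOutInv (land : List (List Int)) (stA : List (List Int) × List Int)
    (stB : List (Int × Int) × List (Int × Int × Int)) : Prop :=
  ∃ V : Finset (Int × Int),
    pvVisRep land stA.1 V ∧ pvSeenRep stB.1 V ∧
    stA.2.length = (pvM land).toNat + 1 ∧
    (∀ k : Nat, stA.2.getD k 0 = pvSumC stB.2 (k : Int)) ∧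
    (∀ t ∈ stB.2, 0 ≤ t.1 ∧ t.2.2 < pvM land)
theorem pvOutStep (land : List (List Int)) (i j : Int)
    (hi0 : 0 ≤ i) (hin : i < pvN land) (hj0 : 0 ≤ j) (hjm : j < pvM land)
    (stA : List (List Int) × List Int) (stB : List (Int × Int) × List (Int × Int × Int))
    (h : pvOutInv land stA stB) :
    pvOutInv land
      (if pvLandGet stA.1 i j = 0 ∧ pvLandGet land i j = 1 then
        pvBfsA land i j stA.1 stA.2 else stA)
      (if pvLandGet land i j = 1 ∧ PySem.Set.contains stB.1 (i, j) = false then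
        ((pvDfsLoop land (2 * (pvN land).toNat * (pvM land).toNat + 2)
            (PySem.Set.add stB.1 (i, j), [(i, j)], 0, j, j)).1,
         stB.2 ++ [((pvDfsLoop land (2 * (pvN land).toNat * (pvM land).toNat + 2)
              (PySem.Set.add stB.1 (i, j), [(i, j)], 0, j, j)).2.1,
            (pvDfsLoop land (2 * (pvN land).toNat * (pvM land).toNat + 2)
              (PySem.Set.add stB.1 (i, j), [(i, j)], 0, j, j)).2.2.1,
            (pvDfsLoop land (2 * (pvN land).toNat * (pvM land).toNat + 2)
              (PySem.Set.add stB.1 (i, j), [(i, j)], 0, j, j)).2.2.2)])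
       else stB) := by
  obtain ⟨V, hA, hB, hlen, hget, hOK⟩ := h
  have hinB : pvInB land (i, j) := ⟨hi0, hin, hj0, hjm⟩
  by_cases hseed : (i, j) ∉ V ∧ pvLandGet land i j = 1
  · have hone : pvOne land (i, j) := ⟨hinB, hseed.2⟩
    rw [if_pos ⟨(pvVisRep_get hA hinB).2 hseed.1, hseed.2⟩,
      if_pos ⟨hseed.2, (pvSeenRep_contains hB).2 hseed.1⟩]
    obtain ⟨PA, mn, mx, hex, hrepA', hmnA, hmxA, hres⟩ :=
      pvBfsA_spec land V i j stA.1 stA.2 hA hone hseed.1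
    obtain ⟨PB, hexB, hrepB', hsizeB, hloB, hhiB⟩ := pvDfsB_spec land V i j stB.1 hB hone hseed.1
    have hPP : PB = PA := pvExSpec_unique hexB hex
    rw [hPP] at hrepB' hsizeB hloB hhiB
    have hPone : ∀ c ∈ PA, pvOne land c := fun c hc => pvReach_one hone (hex.2.1 c hc)
    have hmn_mem : mn ∈ PA.image Prod.snd := Finset.mem_of_min hmnA
    have hmx_mem : mx ∈ PA.image Prod.snd := Finset.mem_of_max hmxA
    obtain ⟨cmn, hcmn, hcmn2⟩ := Finset.mem_image.mp hmn_mem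
    obtain ⟨cmx, hcmx, hcmx2⟩ := Finset.mem_image.mp hmx_mem
    have hmn0 : 0 ≤ mn := by rw [← hcmn2]; exact (hPone cmn hcmn).1.2.2.1
    have hmxm : mx < pvM land := by rw [← hcmx2]; exact (hPone cmx hcmx).1.2.2.2
    -- the B loop returned exactly (card, mn, mx)
    have hlo' : (pvDfsLoop land (2 * (pvN land).toNat * (pvM land).toNat + 2)
        (PySem.Set.add stB.1 (i, j), [(i, j)], 0, j, j)).2.2.1 = mn := by
      have := hloB.symm.trans hmnA
      exact_mod_cast this
    have hhi' : (pvDfsLoop land (2 * (pvN land).toNat * (pvM land).toNat + 2)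
        (PySem.Set.add stB.1 (i, j), [(i, j)], 0, j, j)).2.2.2 = mx := by
      have := hhiB.symm.trans hmxA
      exact_mod_cast this
    have hm0 : (0 : Int) ≤ pvM land := by omega
    have hmxlen : mx < ((stA.2).length : Int) := by rw [hlen]; push_cast; omega
    obtain ⟨hlen', hget'⟩ := pvRangeAdd_spec (PA.card : Int) mx ((mx + 1 - mn).toNat) mn stA.2
      rfl hmn0 hmxlen
    refine ⟨V ∪ PA, hrepA', hrepB', ?_, ?_, ?_⟩
    · show (pvBfsA land i j stA.1 stA.2).2.length = (pvM land).toNat + 1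
      rw [hres, hlen', hlen]
    · intro k
      show (pvBfsA land i j stA.1 stA.2).2.getD k 0 = _
      rw [hres, hget' k, hget k, hsizeB, hlo', hhi', pvSumC_append]
    · intro t ht
      rcases List.mem_append.mp ht with ht | ht
      · exact hOK t ht
      · rcases List.mem_cons.mp ht with rfl | ht
        · refine ⟨?_, ?_⟩
          · rw [hsizeB]; positivity
          · show (pvDfsLoop land (2 * (pvN land).toNat * (pvM land).toNat + 2)
              (PySem.Set.add stB.1 (i, j), [(i, j)], 0, j, j)).2.2.2 < pvM land
            rw [hhi']; exact hmxm
        · simp at ht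
  · have hAg : ¬ (pvLandGet stA.1 i j = 0 ∧ pvLandGet land i j = 1) := by
      intro ⟨h1, h2⟩
      exact hseed ⟨(pvVisRep_get hA hinB).1 h1, h2⟩
    have hBg : ¬ (pvLandGet land i j = 1 ∧ PySem.Set.contains stB.1 (i, j) = false) := by
      intro ⟨h1, h2⟩
      exact hseed ⟨(pvSeenRep_contains hB).1 h2, h1⟩
    rw [if_neg hAg, if_neg hBg]
    exact ⟨V, hA, hB, hlen, hget, hOK⟩

theorem pvOutInit (land : List (List Int)) :
    pvOutInv land
      ((PySem.List.pyRange 0 (pvN land) 1).map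
          (fun _ => (PySem.List.pyRange 0 (pvM land) 1).map (fun _ => (0 : Int))),
        (PySem.List.pyRange 0 (pvM land + 1) 1).map (fun _ => (0 : Int)))
      ([], []) := by
  have hn0 : (0 : Int) ≤ pvN land := by simp [pvN]
  have hm0 : (0 : Int) ≤ pvM land := by simp [pvM]
  refine ⟨∅, ⟨?_, ?_, ?_⟩, ?_, ?_, ?_, ?_⟩
  · simp only [List.length_map, PySem.List.length_pyRange_one]
    omega
  · intro row hr
    rcases List.mem_map.mp hr with ⟨_, _, rfl⟩
    simp only [List.length_map, PySem.List.length_pyRange_one]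
    omega
  · intro c hc
    rw [pvLandGet, PySem.List.pyGetD_map_pyRange_of_nonneg _ (pvN land) c.1 [] hc.1 hc.2.1,
      PySem.List.pyGetD_map_pyRange_of_nonneg _ (pvM land) c.2 0 hc.2.2.1 hc.2.2.2]
    simp
  · intro c
    simp
  · simp only [List.length_map, PySem.List.length_pyRange_one]
    omega
  · intro k
    show ((PySem.List.pyRange 0 (pvM land + 1) 1).map (fun _ => (0 : Int))).getD k 0 =
      pvSumC [] (k : Int)
    rw [List.getD_eq_getElem?_getD, List.getElem?_map]
    cases (PySem.List.pyRange 0 (pvM land + 1) 1)[k]? <;> rfl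
  · intro t ht
    simp at ht

theorem pvResEq (land : List (List Int)) (res : List Int) (comps : List (Int × Int × Int))
    (hlen : res.length = (pvM land).toNat + 1)
    (hget : ∀ k : Nat, res.getD k 0 = pvSumC comps (k : Int)) :
    res = (List.range ((pvM land).toNat + 1)).map (fun k : Nat => pvSumC comps (k : Int)) := by
  apply List.ext_getElem (by simp [hlen])
  intro i h1 h2
  have hh := hget i
  rw [List.getD_eq_getElem res 0 h1] at hh
  rw [hh]
  simp

theorem pvMaxD_append_zero (l : List Int) (h : ∀ x ∈ l, 0 ≤ x) :
    (PySem.List.max? (l ++ [(0 : Int)]) (fun y => y)).getD 0 =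
    (PySem.List.max? l (fun y => y)).getD 0 := by
  cases l with
  | nil => rfl
  | cons x t =>
    rw [List.cons_append, PySem.List.max?_id_cons, PySem.List.max?_id_cons, List.foldl_append]
    simp only [List.foldl_cons, List.foldl_nil, Option.getD_some]
    have h1 := (PySem.List.le_foldl_max t x).1
    have h0 : 0 ≤ x := h x List.mem_cons_self
    exact max_eq_left (le_trans h0 h1)

theorem pvBList_eq (land : List (List Int)) (comps : List (Int × Int × Int)) :
    (PySem.List.pyRange 0 (pvM land) 1).map (pvSumC comps) =
    (List.range (pvM land).toNat).map (fun k : Nat => pvSumC comps (k : Int)) := by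
  rw [PySem.List.pyRange_one 0 (pvM land), List.map_map]
  simp

theorem pvFinal (land : List (List Int)) (stA : List (List Int) × List Int)
    (stB : List (Int × Int) × List (Int × Int × Int)) (h : pvOutInv land stA stB) :
    (PySem.List.max? stA.2 (fun y => y)).getD 0 =
    (PySem.List.max? ((PySem.List.pyRange 0 (pvM land) 1).map (pvSumC stB.2))
      (fun y => y)).getD 0 := by
  obtain ⟨V, hA, hB, hlen, hget, hOK⟩ := h
  have hm0 : (0 : Int) ≤ pvM land := by simp [pvM]
  have hcast : ((pvM land).toNat : Int) = pvM land := Int.toNat_of_nonneg hm0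
  rw [pvResEq land _ _ hlen hget, pvBList_eq land, List.range_succ, List.map_append,
    List.map_cons, List.map_nil]
  have hzero : pvSumC stB.2 (((pvM land).toNat : Nat) : Int) = 0 :=
    pvSumC_high _ _ (fun t ht => by have := (hOK t ht).2; omega)
  rw [hzero]
  refine pvMaxD_append_zero _ ?_
  intro x hx
  rcases List.mem_map.mp hx with ⟨k, _, rfl⟩
  exact pvSumC_nonneg _ _ (fun t ht => (hOK t ht).1)

-- ===== VERDICT (by name: the statement is the Claim_ definition above) =====
theorem solution_spec : Claim_equal_solution := by
  intro land _ _
  show solution land = solution_alt land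
  have hrel := pvFoldlRel (pvOutInv land)
      (fun (st : List (List Int) × List Int) (i : Int) =>
        (PySem.List.pyRange 0 (pvM land) 1).foldl
          (fun (st : List (List Int) × List Int) (j : Int) =>
            if pvLandGet st.1 i j = 0 ∧ pvLandGet land i j = 1 then
              pvBfsA land i j st.1 st.2 else st) st)
      (fun (st : List (Int × Int) × List (Int × Int × Int)) (i : Int) =>
        (PySem.List.pyRange 0 (pvM land) 1).foldl
          (fun (st : List (Int × Int) × List (Int × Int × Int)) (j : Int) =>
            if pvLandGet land i j = 1 ∧ PySem.Set.contains st.1 (i, j) = false then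
              (let r := pvDfsLoop land (2 * (pvN land).toNat * (pvM land).toNat + 2)
                  (PySem.Set.add st.1 (i, j), [(i, j)], 0, j, j)
               (r.1, st.2 ++ [(r.2.1, r.2.2.1, r.2.2.2)]))
            else st) st)
      (PySem.List.pyRange 0 (pvN land) 1)
      ((PySem.List.pyRange 0 (pvN land) 1).map
          (fun _ => (PySem.List.pyRange 0 (pvM land) 1).map (fun _ => (0 : Int))),
        (PySem.List.pyRange 0 (pvM land + 1) 1).map (fun _ => (0 : Int)))
      ([], [])
      (pvOutInit land)
      (by
        intro i hi stA stB h
        have hib := PySem.List.mem_pyRange_one.mp hi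
        refine pvFoldlRel (pvOutInv land) _ _ (PySem.List.pyRange 0 (pvM land) 1) stA stB h ?_
        intro j hj a b hh
        have hjb := PySem.List.mem_pyRange_one.mp hj
        exact pvOutStep land i j hib.1 hib.2 hjb.1 hjb.2 a b hh)
  obtain ⟨V, hA, hB, hlen, hget, hOK⟩ := hrel
  show (PySem.List.max? (List.foldl
      (fun (st : List (List Int) × List Int) (i : Int) =>
        (PySem.List.pyRange 0 (pvM land) 1).foldl
          (fun (st : List (List Int) × List Int) (j : Int) =>
            if pvLandGet st.1 i j = 0 ∧ pvLandGet land i j = 1 then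
              pvBfsA land i j st.1 st.2 else st) st)
      ((PySem.List.pyRange 0 (pvN land) 1).map
          (fun _ => (PySem.List.pyRange 0 (pvM land) 1).map (fun _ => (0 : Int))),
        (PySem.List.pyRange 0 (pvM land + 1) 1).map (fun _ => (0 : Int)))
      (PySem.List.pyRange 0 (pvN land) 1)).2 (fun y => y)).getD 0 =
    (PySem.List.max? ((PySem.List.pyRange 0 (pvM land) 1).map (pvSumC (List.foldl
      (fun (st : List (Int × Int) × List (Int × Int × Int)) (i : Int) =>
        (PySem.List.pyRange 0 (pvM land) 1).foldl
          (fun (st : List (Int × Int) × List (Int × Int × Int)) (j : Int) =>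
            if pvLandGet land i j = 1 ∧ PySem.Set.contains st.1 (i, j) = false then
              (let r := pvDfsLoop land (2 * (pvN land).toNat * (pvM land).toNat + 2)
                  (PySem.Set.add st.1 (i, j), [(i, j)], 0, j, j)
               (r.1, st.2 ++ [(r.2.1, r.2.2.1, r.2.2.2)]))
            else st) st)
      (([] : List (Int × Int)), ([] : List (Int × Int × Int)))
      (PySem.List.pyRange 0 (pvN land) 1)).2)) (fun y => y)).getD 0
  exact pvFinal land _ _ ⟨V, hA, hB, hlen, hget, hOK⟩
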